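-- pv_equiv track=rewrite | github.com/GUUTA/qubee-nlp | src/qubee_nlp/utils/helpers.py | find_repeated_patterns
-- ===== SOURCE A (Python) =====
-- from typing import List, Dict, Tuple, Set, Optional, Counter as CounterType
--
-- def find_repeated_patterns(text: str, min_length: int = 3) -> Dict[str, int]:
--     """
--     Find repeated character patterns in text.
--
--     Args:
--         text: Text to analyze
--         min_length: Minimum pattern length to consider
--
--     Returns:
--         Dictionary of patterns and their counts
--     """
--     patterns = {}
--     text_lower = text.lower()
--
--     for length in range(min_length, len(text_lower) // 2 + 1):
--         for i in range(len(text_lower) - length + 1):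
--             pattern = text_lower[i:i + length]
--
--             # Count occurrences
--             count = text_lower.count(pattern)
--
--             if count > 1:
--                 patterns[pattern] = count
--
--     # Filter to only keep non-overlapping patterns
--     filtered_patterns = {}
--     sorted_patterns = sorted(patterns.items(), key=lambda x: (-len(x[0]), -x[1]))
--     used_positions = set()
--
--     for pattern, count in sorted_patterns:
--         positions = []
--         pos = text_lower.find(pattern)
--
--         while pos != -1:
--             # Check if this position overlaps with already used positions
--             overlap = False
--             for p in range(pos, pos + len(pattern)):
--                 if p in used_positions:
--                     overlap = True
--                     break
--
--             if not overlap: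
--                 positions.append(pos)
--                 for p in range(pos, pos + len(pattern)):
--                     used_positions.add(p)
--
--             pos = text_lower.find(pattern, pos + 1)
--
--         if len(positions) > 1:
--             filtered_patterns[pattern] = len(positions)
--
--     return filtered_patterns
-- ===== SOURCE B (Python) =====
-- def find_repeated_patterns(text, min_length=3):
--     t = text.lower()
--     n = len(t)
--     result = {}
--     used = set()
--     # one pass over lengths, LONGEST first: no global pattern dict, no global sort
--     for length in range(n // 2, max(min_length, 1) - 1, -1):
--         # index this length's windows: pattern -> all start positions (ascending)
--         occ = {}
--         for i in range(n - length + 1):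
--             occ.setdefault(t[i:i + length], []).append(i)
--         # repeated patterns of this length; the non-overlapping occurrence count
--         # (Python's str.count) is read off the position list by a greedy scan
--         bucket = []
--         for p, positions in occ.items():
--             c, nxt = 0, 0
--             for i in positions:
--                 if nxt <= i:
--                     c += 1
--                     nxt = i + length
--             if c > 1:
--                 bucket.append((p, c))
--         bucket.sort(key=lambda x: -x[1])
--         # greedy non-overlapping selection straight off the position lists
--         for p, c in bucket:
--             kept = 0
--             for i in occ[p]:
--                 if used.isdisjoint(range(i, i + length)):
--                     kept += 1
--                     used.update(range(i, i + length))
--             if kept > 1: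
--                 result[p] = kept
--     return result
-- ===== Notes on version B (the rewrite author's own statement) =====
-- stated objective: alternative
-- what changed: B replaces A's three staged global passes (global pattern dict over all lengths, global sort by (-len,-count), greedy with repeated str.find rescans and per-window str.count) by a single descending-length loop: per length it builds a position index once, derives each pattern's non-overlapping count by a greedy scan of its position list (no str.count), sorts only that length's bucket by -count, and does the greedy selection straight off the position lists.
-- intended difference: For min_length <= 0 on non-empty text, A additionally reports the empty string (with count one more than the text length) as if it were a repeated pattern - an artifact of slicing with non-positive lengths; B considers only patterns of positive length and omits that entry, which is the intended behaviour. — e.g. on find_repeated_patterns("aa", 0): A returns [("a", 2), ("", 3)], B returns [("a", 2)]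
import Mathlib
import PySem

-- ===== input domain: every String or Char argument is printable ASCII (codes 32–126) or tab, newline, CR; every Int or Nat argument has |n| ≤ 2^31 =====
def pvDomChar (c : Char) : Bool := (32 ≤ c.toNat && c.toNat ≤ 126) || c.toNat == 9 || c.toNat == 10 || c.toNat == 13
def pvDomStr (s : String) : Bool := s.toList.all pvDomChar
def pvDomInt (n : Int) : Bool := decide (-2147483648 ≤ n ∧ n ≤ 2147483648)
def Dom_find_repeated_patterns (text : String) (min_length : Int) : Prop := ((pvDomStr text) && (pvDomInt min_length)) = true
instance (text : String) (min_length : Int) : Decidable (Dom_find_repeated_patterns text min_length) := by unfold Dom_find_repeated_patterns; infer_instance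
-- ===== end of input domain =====

-- B replaces A's staged global passes (pattern dict over all lengths, global sort by
-- (-len,-count), str.count per window, str.find rescans) by one descending-length loop with a
-- per-length position index, counts read off the index by a greedy scan, and per-length buckets
-- sorted by -count (objective: alternative); for min_length <= 0 on non-empty text A's extra ''
-- entry is an artifact and B intentionally omits it (see D_ below).


-- ===== PORT A =====
-- the 'pos = find(...); while pos != -1: ...; pos = find(..., pos+1)' loop of A;
-- fuel only makes the recursion structural (len(t)+2 always suffices: pos strictly increases)
def aFindLoop (t pattern : String) (pos : Int) (acc : List Int × PySem.Set Int) : Nat → List Int × PySem.Set Int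
  | 0 => acc
  | fuel+1 =>
    if pos = -1 then acc
    else
      let span := PySem.List.pyRange pos (pos + PySem.Str.len pattern) 1
      let overlap := span.any (fun q => PySem.Set.contains acc.2 q)
      let acc' := if overlap then acc else (acc.1 ++ [pos], span.foldl PySem.Set.add acc.2)
      aFindLoop t pattern (PySem.Str.findFrom t pattern (pos + 1) none) acc' fuel

def find_repeated_patterns (text : String) (min_length : Int) : List (String × Int) :=
  let t := PySem.Str.lower text
  let n : Int := PySem.Str.len t
  let patterns : PySem.Dict String Int :=
    (PySem.List.pyRange min_length (PySem.Int.floordiv n 2 + 1) 1).foldl (fun pats len =>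
      (PySem.List.pyRange 0 (n - len + 1) 1).foldl (fun pats i =>
        let pattern := PySem.Str.slice t (some i) (some (i + len))
        let count : Int := (PySem.Str.count t pattern : Int)
        if 1 < count then pats.insert pattern count else pats) pats)
      PySem.Dict.empty
  let sorted_patterns := PySem.List.sorted2 patterns.items (fun x => -(PySem.Str.len x.1)) (fun x => -x.2)
  let res := sorted_patterns.foldl (fun (st : PySem.Dict String Int × PySem.Set Int) pc =>
      let r := aFindLoop t pc.1 (PySem.Str.find t pc.1) ([], st.2) ((PySem.Str.len t).toNat + 2)
      if 1 < (PySem.List.len r.1) then (st.1.insert pc.1 (PySem.List.len r.1), r.2) else (st.1, r.2))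
    (PySem.Dict.empty, PySem.Set.empty)
  res.1.items

-- ===== PORT B =====
def find_repeated_patterns_alt (text : String) (min_length : Int) : List (String × Int) :=
  let t := PySem.Str.lower text
  let n : Int := PySem.Str.len t
  let res := (PySem.List.pyRange (PySem.Int.floordiv n 2) (max min_length 1 - 1) (-1)).foldl
    (fun (st : PySem.Dict String Int × PySem.Set Int) length =>
      let occ : PySem.Dict String (List Int) :=
        (PySem.List.pyRange 0 (n - length + 1) 1).foldl (fun occ i =>
          occ.modify (PySem.Str.slice t (some i) (some (i + length))) [] (fun ps => ps ++ [i]))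
          PySem.Dict.empty
      let bucket : List (String × Int) :=
        occ.items.foldl (fun b pr =>
          let r := pr.2.foldl (fun (g : Int × Int) i =>
              if g.2 ≤ i then (g.1 + 1, i + length) else g) (0, 0)
          if 1 < r.1 then b ++ [(pr.1, r.1)] else b) []
      (PySem.List.sorted bucket (fun x => -x.2)).foldl
        (fun (st : PySem.Dict String Int × PySem.Set Int) pc =>
          let r := (occ.getD pc.1 []).foldl (fun (g : Int × PySem.Set Int) i =>
              if PySem.Set.isdisjoint g.2 (PySem.List.pyRange i (i + length) 1)
              then (g.1 + 1, PySem.Set.update g.2 (PySem.List.pyRange i (i + length) 1))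
              else g) (0, st.2)
          if 1 < r.1 then (st.1.insert pc.1 r.1, r.2) else (st.1, r.2)) st)
    (PySem.Dict.empty, PySem.Set.empty)
  res.1.items

-- ===== PRECONDITION & SPEC =====
-- For min_length ≤ 0 on non-empty text, A additionally reports the empty string (with count
-- one more than the text length) as if it were a repeated pattern - an artifact of slicing
-- with non-positive lengths; B considers only patterns of positive length and omits that
-- entry, which is the intended behaviour.
def D_find_repeated_patterns (text : String) (min_length : Int) : Prop := min_length ≤ 0 ∧ text ≠ ""
instance (text : String) (min_length : Int) : Decidable (D_find_repeated_patterns text min_length) := by unfold D_find_repeated_patterns; infer_instance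

def Spec_find_repeated_patterns (text : String) (min_length : Int) (out : List (String × Int)) : Prop := ¬ D_find_repeated_patterns text min_length → out = find_repeated_patterns_alt text min_length
instance (text : String) (min_length : Int) (out : List (String × Int)) : Decidable (Spec_find_repeated_patterns text min_length out) := by unfold Spec_find_repeated_patterns; infer_instance

def pvDiffWitness_find_repeated_patterns : String × Int := ("aa", 0)
def pvDiffWitnessOut_find_repeated_patterns : (List (String × Int)) × (List (String × Int)) := ([("a", 2), ("", 3)], [("a", 2)])

-- ===== CLAIM (what is proved, stated in full; the proofs are below) =====
def Claim_unchanged_find_repeated_patterns : Prop := ∀ (text : String) (min_length : Int), Dom_find_repeated_patterns text min_length → Spec_find_repeated_patterns text min_length (find_repeated_patterns text min_length)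
def Claim_changed_find_repeated_patterns : Prop := Dom_find_repeated_patterns (pvDiffWitness_find_repeated_patterns.1) (pvDiffWitness_find_repeated_patterns.2) ∧ D_find_repeated_patterns (pvDiffWitness_find_repeated_patterns.1) (pvDiffWitness_find_repeated_patterns.2) ∧ find_repeated_patterns (pvDiffWitness_find_repeated_patterns.1) (pvDiffWitness_find_repeated_patterns.2) = pvDiffWitnessOut_find_repeated_patterns.1 ∧ find_repeated_patterns_alt (pvDiffWitness_find_repeated_patterns.1) (pvDiffWitness_find_repeated_patterns.2) = pvDiffWitnessOut_find_repeated_patterns.2 ∧ pvDiffWitnessOut_find_repeated_patterns.1 ≠ pvDiffWitnessOut_find_repeated_patterns.2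

-- ===== LEMMAS AND PROOFS =====

-- ---- shared abbreviations for the proofs ----
def cntI (t p : String) : Int := (PySem.Str.count t p : Int)

def gateStep (t : String) (pats : PySem.Dict String Int) (p : String) : PySem.Dict String Int :=
  if 1 < cntI t p then pats.insert p (cntI t p) else pats

-- the window substrings of one length, in window order
def gkeys (t : String) (L : Int) : List String :=
  (PySem.List.pyRange 0 (PySem.Str.len t - L + 1) 1).map (fun i =>
    PySem.Str.slice t (some i) (some (i + L)))

def gpairs (t : String) (L : Int) : List (String × Int) :=
  (PySem.List.pyRange 0 (PySem.Str.len t - L + 1) 1).map (fun i =>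
    (PySem.Str.slice t (some i) (some (i + L)), i))

def wkeys (t : String) (lo hi : Int) : List String :=
  (PySem.List.pyRange lo hi 1).flatMap (gkeys t)

-- the distinct repeated patterns of a window-key list, with their str.count values
def appNew (t : String) : List String → List String → List (String × Int)
  | [], _ => []
  | p :: l, ks =>
    if 1 < cntI t p ∧ ks.contains p = false then (p, cntI t p) :: appNew t l (ks ++ [p])
    else appNew t l ks

def dedupFrom : List String → List String → List String
  | _, [] => []
  | ks, x :: l => if ks.contains x then dedupFrom ks l else x :: dedupFrom (ks ++ [x]) l

def aStep (pattern : String) (acc : List Int × PySem.Set Int) (pos : Int) : List Int × PySem.Set Int :=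
  let span := PySem.List.pyRange pos (pos + PySem.Str.len pattern) 1
  let overlap := span.any (fun q => PySem.Set.contains acc.2 q)
  if overlap then acc else (acc.1 ++ [pos], span.foldl PySem.Set.add acc.2)

def occInt (t p : String) : List Int :=
  (PySem.List.pyRange 0 (PySem.Str.len t - PySem.Str.len p + 1) 1).filter
    (fun i => PySem.Str.slice t (some i) (some (i + PySem.Str.len p)) == p)

def occsFrom (tl pl : List Char) (k : Nat) : List Nat :=
  if tl.length + 1 ≤ k then []
  else (if pl <+: tl.drop k then [k] else []) ++ occsFrom tl pl (k + 1)
  termination_by tl.length + 1 - k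

-- the non-overlapping (str.count) occurrence count read off the occurrence list
def nov (L : Nat) : List Nat → Nat → Nat
  | [], _ => 0
  | i :: ps, nxt => if nxt ≤ i then nov L ps (i + L) + 1 else nov L ps nxt

def novEnd (L : Nat) : List Nat → Nat → Nat
  | [], nxt => nxt
  | i :: ps, nxt => if nxt ≤ i then novEnd L ps (i + L) else novEnd L ps nxt

-- one block of A's global processing order: the repeated patterns of one length,
-- first-occurrence order, sorted by -count
def blockOf (t : String) (L : Int) : List (String × Int) := appNew t (gkeys t L) []
def sblock (t : String) (L : Int) : List (String × Int) :=
  PySem.List.sorted (blockOf t L) (fun x => -x.2)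

-- sorted2's comparison for A's key pair
def before2 (a b : String × Int) : Bool :=
  decide (-(PySem.Str.len a.1) < -(PySem.Str.len b.1)) ||
    (!decide (-(PySem.Str.len b.1) < -(PySem.Str.len a.1)) && decide (-a.2 < -b.2))

-- the canonical per-pattern selection step both ports reduce to
def cstep (t : String) (st : PySem.Dict String Int × PySem.Set Int) (pc : String × Int) :
    PySem.Dict String Int × PySem.Set Int :=
  let L := PySem.Str.len pc.1
  let r := (occInt t pc.1).foldl (fun (g : Int × PySem.Set Int) i =>
      if PySem.Set.isdisjoint g.2 (PySem.List.pyRange i (i + L) 1)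
      then (g.1 + 1, PySem.Set.update g.2 (PySem.List.pyRange i (i + L) 1))
      else g) (0, st.2)
  if 1 < r.1 then (st.1.insert pc.1 r.1, r.2) else (st.1, r.2)

-- ---- Dict basics ----
theorem dict_contains_keys {ν : Type} (d : PySem.Dict String ν) (p : String) :
    d.contains p = d.keys.contains p := by
  simp only [PySem.Dict.contains, PySem.Dict.keys, List.any_eq, List.contains_eq_mem,
    List.mem_map]
  rw [decide_eq_decide]
  constructor
  · rintro ⟨a, ha, hb⟩; exact ⟨a, ha, by simpa using hb⟩
  · rintro ⟨a, ha, rfl⟩; exact ⟨a, ha, by simp⟩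

theorem insert_fresh_items {ν : Type} (d : PySem.Dict String ν) (p : String) (v : ν)
    (h : d.contains p = false) : (d.insert p v).items = d.items ++ [(p, v)] := by
  simp [PySem.Dict.insert, h]

theorem insert_existing_same (d : PySem.Dict String Int) (p : String) (v : Int)
    (h : d.contains p = true) (hall : ∀ pr ∈ d.items, pr.1 = p → pr.2 = v) :
    d.insert p v = d := by
  apply PySem.Dict.ext
  simp only [PySem.Dict.insert, h, if_true]
  conv_rhs => rw [← List.map_id d.items]
  apply List.map_congr_left
  intro pr hpr
  by_cases hk : pr.1 = p
  · simp only [hk, beq_self_eq_true, if_true, id]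
    exact Prod.ext hk.symm (hall pr hpr hk).symm
  · simp [hk]

-- ---- phase 1: the patterns dict, as a closed form ----
theorem foldl_gate_items (t : String) :
    ∀ (l : List String) (d : PySem.Dict String Int),
      (∀ pr ∈ d.items, pr.2 = cntI t pr.1) →
      (l.foldl (gateStep t) d).items = d.items ++ appNew t l d.keys
  | [], d, hd => by simp [appNew]
  | p :: l, d, hd => by
    rw [List.foldl_cons]
    by_cases hc : 1 < cntI t p
    · by_cases hk : d.contains p = true
      · have hstep : gateStep t d p = d := by
          rw [gateStep, if_pos hc]
          exact insert_existing_same d p _ hk (fun pr hpr he => by rw [hd pr hpr, he])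
        rw [hstep, foldl_gate_items t l d hd, appNew]
        have hk' : d.keys.contains p = true := by rw [← dict_contains_keys]; exact hk
        rw [if_neg (by intro h; rw [hk'] at h; exact absurd h.2 (by simp))]
      · have hk0 : d.contains p = false := by simpa using hk
        have hstep : gateStep t d p = d.insert p (cntI t p) := by rw [gateStep, if_pos hc]
        have hitems := insert_fresh_items d p (cntI t p) hk0
        have hkeys : (d.insert p (cntI t p)).keys = d.keys ++ [p] := by
          simp [PySem.Dict.keys, hitems]
        have hd' : ∀ pr ∈ (d.insert p (cntI t p)).items, pr.2 = cntI t pr.1 := by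
          intro pr hpr
          rw [hitems] at hpr
          rcases List.mem_append.1 hpr with h1 | h1
          · exact hd pr h1
          · simp at h1; subst h1; rfl
        rw [hstep, foldl_gate_items t l _ hd', hitems, hkeys, appNew]
        have hk' : d.keys.contains p = false := by rw [← dict_contains_keys]; exact hk0
        rw [if_pos ⟨hc, hk'⟩]
        simp
    · have hstep : gateStep t d p = d := by rw [gateStep, if_neg hc]
      rw [hstep, foldl_gate_items t l d hd, appNew]
      rw [if_neg (by intro h; exact hc h.1)]

theorem update_eq_dedupFrom : ∀ (l ks : List String), PySem.Set.update ks l = ks ++ dedupFrom ks l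
  | [], ks => by simp [PySem.Set.update, dedupFrom]
  | x :: l, ks => by
    rw [dedupFrom]
    by_cases hk : ks.contains x
    · have : PySem.Set.add ks x = ks := by
        simp only [PySem.Set.add, PySem.Set.contains]
        simp only [List.contains_eq_mem] at hk ⊢
        simp [hk]
      rw [if_pos hk, show PySem.Set.update ks (x :: l) = PySem.Set.update (PySem.Set.add ks x) l from rfl, this]
      exact update_eq_dedupFrom l ks
    · have : PySem.Set.add ks x = ks ++ [x] := by
        simp only [PySem.Set.add, PySem.Set.contains]
        simp only [List.contains_eq_mem] at hk ⊢
        simp [hk]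
      rw [if_neg hk, show PySem.Set.update ks (x :: l) = PySem.Set.update (PySem.Set.add ks x) l from rfl, this]
      rw [update_eq_dedupFrom l (ks ++ [x])]
      simp

theorem appNew_dedupFrom (t : String) :
    ∀ (l ks seen : List String),
      (∀ x, ks.contains x = true → (seen.contains x = true ∨ cntI t x ≤ 1)) →
      appNew t l seen = appNew t (dedupFrom ks l) seen
  | [], ks, seen, h => by simp [dedupFrom, appNew]
  | x :: l, ks, seen, h => by
    by_cases hk : ks.contains x
    · rw [dedupFrom, if_pos hk, appNew]
      rcases h x hk with hs | hc
      · rw [if_neg (by intro hh; rw [hs] at hh; exact absurd hh.2 (by simp))]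
        exact appNew_dedupFrom t l ks seen h
      · rw [if_neg (by intro hh; omega)]
        exact appNew_dedupFrom t l ks seen h
    · rw [dedupFrom, if_neg hk, appNew, appNew]
      by_cases hcond : 1 < cntI t x ∧ seen.contains x = false
      · rw [if_pos hcond, if_pos hcond]
        have h' : ∀ y, (ks ++ [x]).contains y = true → ((seen ++ [x]).contains y = true ∨ cntI t y ≤ 1) := by
          intro y hy
          simp only [List.contains_eq_mem, List.mem_append, decide_eq_true_eq] at hy ⊢
          rcases hy with hy | hy
          · rcases h y (by simpa using hy) with hs | hcle
            · left; left; simpa using hs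
            · right; exact hcle
          · left; right; exact hy
        rw [appNew_dedupFrom t l (ks ++ [x]) (seen ++ [x]) h']
      · rw [if_neg hcond, if_neg hcond]
        have h' : ∀ y, (ks ++ [x]).contains y = true → (seen.contains y = true ∨ cntI t y ≤ 1) := by
          intro y hy
          simp only [List.contains_eq_mem, List.mem_append, decide_eq_true_eq] at hy
          rcases hy with hy | hy
          · exact h y (by simpa using hy)
          · simp only [List.mem_singleton] at hy; subst hy
            rcases Decidable.not_and_iff_not_or_not.1 hcond with hx | hx
            · right; omega
            · left; simpa using hx
        rw [appNew_dedupFrom t l (ks ++ [x]) seen h']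

theorem mem_appNew (t : String) :
    ∀ (l ks : List String) (pr : String × Int), pr ∈ appNew t l ks → pr.1 ∈ l ∧ pr.2 = cntI t pr.1
  | [], ks, pr, h => by simp [appNew] at h
  | p :: l, ks, pr, h => by
    rw [appNew] at h
    by_cases hcond : 1 < cntI t p ∧ ks.contains p = false
    · rw [if_pos hcond] at h
      rcases List.mem_cons.1 h with h1 | h1
      · subst h1; exact ⟨List.mem_cons_self, rfl⟩
      · have := mem_appNew t l (ks ++ [p]) pr h1
        exact ⟨List.mem_cons_of_mem _ this.1, this.2⟩
    · rw [if_neg hcond] at h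
      have := mem_appNew t l ks pr h
      exact ⟨List.mem_cons_of_mem _ this.1, this.2⟩

theorem appNew_seen_congr (t : String) :
    ∀ (l s1 s2 : List String), (∀ p ∈ l, s1.contains p = s2.contains p) →
      appNew t l s1 = appNew t l s2
  | [], s1, s2, h => by simp [appNew]
  | p :: l, s1, s2, h => by
    rw [appNew, appNew, h p List.mem_cons_self]
    by_cases hc : 1 < cntI t p ∧ s2.contains p = false
    · rw [if_pos hc, if_pos hc]
      have h' : ∀ q ∈ l, (s1 ++ [p]).contains q = (s2 ++ [p]).contains q := by
        intro q hq
        simp only [List.contains_eq_mem, List.mem_append, decide_eq_true_eq] at *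
        rw [decide_eq_decide]
        have := h q (List.mem_cons_of_mem _ hq)
        rw [decide_eq_decide] at this
        tauto
      rw [appNew_seen_congr t l _ _ h']
    · rw [if_neg hc, if_neg hc]
      exact appNew_seen_congr t l s1 s2 (fun q hq => h q (List.mem_cons_of_mem _ hq))

theorem appNew_append_block (t : String) :
    ∀ (ks1 ks2 : List String) (seen : List String),
      (∀ p ∈ ks2, seen.contains p = false) → (∀ p ∈ ks2, ks1.contains p = false) →
      appNew t (ks1 ++ ks2) seen = appNew t ks1 seen ++ appNew t ks2 []
  | [], ks2, seen, h1, _ => by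
    rw [List.nil_append, appNew, List.nil_append]
    exact appNew_seen_congr t ks2 seen [] (by intro p hp; rw [h1 p hp]; simp)
  | q :: ks1, ks2, seen, h1, h2 => by
    rw [List.cons_append, appNew, appNew]
    by_cases hc : 1 < cntI t q ∧ seen.contains q = false
    · rw [if_pos hc, if_pos hc, List.cons_append]
      have h1' : ∀ p ∈ ks2, (seen ++ [q]).contains p = false := by
        intro p hp
        have hq : (q :: ks1).contains p = false := h2 p hp
        have hs : seen.contains p = false := h1 p hp
        rw [List.contains_eq_mem, decide_eq_false_iff_not] at hq hs ⊢
        rw [List.mem_append, List.mem_singleton]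
        rintro (h | rfl)
        · exact hs h
        · exact hq List.mem_cons_self
      have h2' : ∀ p ∈ ks2, ks1.contains p = false := by
        intro p hp
        have hq := h2 p hp
        simp only [List.contains_eq_mem, decide_eq_false_iff_not, List.mem_cons] at *
        exact fun h => hq (Or.inr h)
      rw [appNew_append_block t ks1 ks2 (seen ++ [q]) h1' h2']
    · rw [if_neg hc, if_neg hc]
      have h2' : ∀ p ∈ ks2, ks1.contains p = false := by
        intro p hp
        have hq := h2 p hp
        simp only [List.contains_eq_mem, decide_eq_false_iff_not, List.mem_cons] at *
        exact fun h => hq (Or.inr h)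
      rw [appNew_append_block t ks1 ks2 seen h1 h2']

-- ---- windows ----
theorem clamp_of (n : Nat) (x : Int) (h0 : 0 ≤ x) (h1 : x ≤ (n : Int)) :
    PySem.List.clampIdx n x = x.toNat := by
  unfold PySem.List.clampIdx
  rw [if_neg (by omega)]
  omega

theorem len_slice_window (t : String) (L i : Int) (h0 : 0 ≤ i) (hL : 0 ≤ L)
    (hin : i + L ≤ PySem.Str.len t) :
    PySem.Str.len (PySem.Str.slice t (some i) (some (i + L))) = L := by
  rw [PySem.Str.len_eq] at hin
  rw [PySem.Str.len_eq, PySem.Str.toList_slice, PySem.Chars.slice_eq_listSlice,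
    PySem.List.length_slice, clamp_of _ _ (by omega) (by omega), clamp_of _ _ h0 (by omega)]
  omega

theorem len_mem_gkeys (t : String) (L : Int) (hL : 0 ≤ L) :
    ∀ p ∈ gkeys t L, PySem.Str.len p = L := by
  intro p hp
  rcases List.mem_map.1 hp with ⟨i, hi, rfl⟩
  rw [PySem.List.mem_pyRange_one] at hi
  exact len_slice_window t L i (by omega) hL (by omega)

theorem gpairs_filter_key (t : String) (L : Int) (p : String) (hlen : PySem.Str.len p = L) :
    ((gpairs t L).filter (fun pr => pr.1 == p)).map (·.2) = occInt t p := by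
  rw [gpairs, List.filter_map, List.map_map, occInt, hlen]
  have : ((fun x : String × Int => x.2) ∘ fun i : Int =>
      (PySem.Str.slice t (some i) (some (i + L)), i)) = id := rfl
  rw [this, List.map_id]
  rfl

-- ---- occurrence lists ----
theorem occsFrom_eq_filter (tl pl : List Char) :
    ∀ k, occsFrom tl pl k =
      ((List.range (tl.length + 1 - k)).map (k + ·)).filter (fun j => decide (pl <+: tl.drop j))
  | k => by
    rw [occsFrom]
    by_cases h : tl.length + 1 ≤ k
    · rw [if_pos h, show tl.length + 1 - k = 0 from by omega]
      rfl
    · rw [if_neg h]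
      have h1 : tl.length + 1 - k = (tl.length + 1 - (k + 1)) + 1 := by omega
      rw [h1, List.range_succ_eq_map, occsFrom_eq_filter tl pl (k + 1)]
      simp only [List.map_cons, List.map_map, List.filter_cons]
      have hmap : ((k + ·) ∘ Nat.succ) = ((k + 1) + ·) := by
        funext j; simp [Function.comp]; omega
      rw [hmap]
      split <;> simp_all
  termination_by k => tl.length + 1 - k

theorem occInt_eq (t p : String) (h1 : 1 ≤ PySem.Str.len p) (h2 : PySem.Str.len p ≤ PySem.Str.len t) :
    occInt t p = (occsFrom t.toList p.toList 0).map (fun j : Nat => (j : Int)) := by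
  have hL : 1 ≤ p.toList.length := by rw [PySem.Str.len_eq] at h1; omega
  have hn : p.toList.length ≤ t.toList.length := by
    rw [PySem.Str.len_eq, PySem.Str.len_eq] at h2; omega
  set n := t.toList.length with hndef
  set L := p.toList.length with hLdef
  have hm : PySem.Str.len t - PySem.Str.len p + 1 = ((n - L + 1 : Nat) : Int) := by
    rw [PySem.Str.len_eq, PySem.Str.len_eq]; omega
  rw [occInt, hm, PySem.List.pyRange_zero_nat, List.filter_map,
    occsFrom_eq_filter t.toList p.toList 0]
  have hzero : ((0 : Nat) + ·) = (id : Nat → Nat) := by funext j; simp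
  rw [Nat.sub_zero, hzero, List.map_id]
  refine congrArg (List.map _) ?_
  conv_rhs => rw [show n + 1 = (n - L + 1) + L from by omega, List.range_add]
  rw [List.filter_append]
  have htail : ((List.range L).map (fun x => (n - L + 1) + x)).filter
      (fun j => decide (p.toList <+: t.toList.drop j)) = [] := by
    rw [List.filter_eq_nil_iff]
    intro a ha
    rcases List.mem_map.1 ha with ⟨j, hj, rfl⟩
    simp only [decide_eq_true_eq]
    intro hpref
    have := hpref.length_le
    rw [List.length_drop] at this
    omega
  rw [htail, List.append_nil]
  apply List.filter_congr
  intro j hj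
  rw [List.mem_range] at hj
  simp only [Function.comp_apply]
  rw [Bool.beq_eq_decide_eq, decide_eq_decide]
  have harith : ((j : Int) + PySem.Str.len p).toNat = j + L := by rw [PySem.Str.len_eq]; omega
  have hj' : ((j : Int)).toNat = j := by omega
  have hslice : (PySem.Str.slice t (some (j:Int)) (some ((j:Int) + PySem.Str.len p))).toList
      = List.take L (List.drop j t.toList) := by
    rw [PySem.Str.toList_slice, PySem.Chars.slice_eq_listSlice,
      PySem.List.slice_toNat _ (by omega) (by rw [PySem.Str.len_eq]; omega), harith, hj']
    congr 1
    omega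
  constructor
  · intro heq
    have h := congrArg String.toList heq
    rw [hslice] at h
    rw [List.prefix_iff_eq_take, show p.toList.length = L from rfl]
    exact h.symm
  · intro hpref
    apply String.toList_inj.1
    rw [hslice]
    rw [List.prefix_iff_eq_take, show p.toList.length = L from rfl] at hpref
    exact hpref.symm

theorem occsFrom_skip (tl pl : List Char) :
    ∀ (k k' : Nat), k ≤ k' → k' ≤ tl.length + 1 →
      (∀ j, k ≤ j → j < k' → ¬ pl <+: tl.drop j) → occsFrom tl pl k = occsFrom tl pl k'
  | k, k', hle, hub, hno => by
    rcases Nat.eq_or_lt_of_le hle with rfl | hlt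
    · rfl
    · rw [occsFrom, if_neg (by omega), if_neg (hno k le_rfl hlt), List.nil_append]
      exact occsFrom_skip tl pl (k+1) k' hlt hub (fun j h1 h2 => hno j (by omega) h2)
  termination_by k k' => k' - k

theorem occsFrom_nil_of_ge (tl pl : List Char) (k : Nat) (hk : tl.length ≤ k)
    (hpl : pl ≠ []) : occsFrom tl pl k = [] := by
  rw [occsFrom]
  by_cases h : tl.length + 1 ≤ k
  · rw [if_pos h]
  · rw [if_neg h]
    have hk' : k = tl.length := by omega
    have hdrop : tl.drop k = [] := by rw [hk', List.drop_length]
    rw [hdrop]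
    have : ¬ pl <+: ([] : List Char) := by
      intro hp
      exact hpl (List.prefix_nil.1 hp)
    rw [if_neg this, List.nil_append, occsFrom, if_pos (by omega)]

theorem mem_occsFrom_ge (tl pl : List Char) (k : Nat) :
    ∀ i ∈ occsFrom tl pl k, k ≤ i := by
  intro i hi
  rw [occsFrom_eq_filter] at hi
  rcases List.mem_map.1 (List.mem_of_mem_filter hi) with ⟨j, _, rfl⟩
  omega

-- ---- the find-loop of A is a fold over the occurrence list ----
theorem scan_eq (t p : String) (hp : p.toList ≠ []) :
    ∀ (fuel k : Nat) (acc : List Int × PySem.Set Int), k ≤ t.toList.length →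
      t.toList.length + 2 - k ≤ fuel →
      aFindLoop t p (PySem.Str.findFrom t p (k : Int) none) acc fuel
        = ((occsFrom t.toList p.toList k).map (fun j : Nat => (j : Int))).foldl (aStep p) acc
  | 0, k, acc, hk, hfuel => by omega
  | fuel+1, k, acc, hk, hfuel => by
    rw [aFindLoop]
    rw [PySem.Str.findFrom_eq]
    by_cases hm : PySem.Chars.findFrom t.toList p.toList (k : Int) none = -1
    · rw [if_pos hm]
      have hnone : ¬ p.toList <:+: t.toList.drop k :=
        (PySem.Chars.findFrom_natCast_eq_neg_one_iff t.toList p.toList k hk).1 hm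
      have hno : ∀ j, k ≤ j → j < t.toList.length + 1 → ¬ p.toList <+: t.toList.drop j := by
        intro j h1 _ hpref
        exact hnone ((hpref.isInfix).trans (List.drop_suffix_drop_left t.toList h1).isInfix)
      have hempty : occsFrom t.toList p.toList k = [] := by
        rw [occsFrom_skip t.toList p.toList k (t.toList.length + 1) (by omega) le_rfl hno,
          occsFrom, if_pos le_rfl]
      rw [hempty]
      rfl
    · rw [if_neg hm]
      obtain ⟨hge, hpref, hmin⟩ := PySem.Chars.findFrom_natCast_spec t.toList p.toList k hk hm
      set m : Int := PySem.Chars.findFrom t.toList p.toList (k : Int) none with hmdef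
      have hm0 : 0 ≤ m := le_trans (by positivity) hge
      have hlen := hpref.length_le
      rw [List.length_drop] at hlen
      have hL1 : 1 ≤ p.toList.length := List.length_pos_iff.2 hp
      have hmn : m.toNat ≤ t.toList.length - p.toList.length := by omega
      have hocc : occsFrom t.toList p.toList k = m.toNat :: occsFrom t.toList p.toList (m.toNat + 1) := by
        rw [occsFrom_skip t.toList p.toList k m.toNat (by omega) (by omega)
          (fun j h1 h2 => hmin j h1 h2)]
        rw [occsFrom, if_neg (by omega), if_pos (by rwa [])]
        rfl
      rw [hocc, List.map_cons, List.foldl_cons]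
      have hcast : ((m.toNat : Nat) : Int) = m := by omega
      rw [hcast]
      have hnext : (m + 1 : Int) = ((m.toNat + 1 : Nat) : Int) := by omega
      rw [hnext]
      exact scan_eq t p hp fuel (m.toNat + 1) (aStep p acc m) (by omega) (by omega)

-- ---- the two selection inner folds agree ----
theorem isdisjoint_span (used : PySem.Set Int) (span : List Int) :
    PySem.Set.isdisjoint used span = !(span.any (fun q => PySem.Set.contains used q)) := by
  by_cases h : ∃ q ∈ span, q ∈ used
  · rcases h with ⟨q, hq, hqu⟩
    have h1 : PySem.Set.isdisjoint used span = false := by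
      rw [← Bool.not_eq_true]
      intro hd
      exact (PySem.Set.isdisjoint_iff used span).1 hd q hqu hq
    have h2 : span.any (fun q => PySem.Set.contains used q) = true := by
      rw [List.any_eq_true]
      exact ⟨q, hq, by simpa [PySem.Set.contains_eq_decide] using hqu⟩
    rw [h1, h2]
    rfl
  · push_neg at h
    have h1 : PySem.Set.isdisjoint used span = true :=
      (PySem.Set.isdisjoint_iff used span).2 (fun x hxu hxs => h x hxs hxu)
    have h2 : span.any (fun q => PySem.Set.contains used q) = false := by
      rw [← Bool.not_eq_true, List.any_eq_true]
      rintro ⟨q, hq, hc⟩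
      exact h q hq (by simpa [PySem.Set.contains_eq_decide] using hc)
    rw [h1, h2]
    rfl

theorem foldl_ab (p : String) :
    ∀ (occs : List Int) (pos : List Int) (used : PySem.Set Int),
      occs.foldl (fun (g : Int × PySem.Set Int) i =>
          if PySem.Set.isdisjoint g.2 (PySem.List.pyRange i (i + PySem.Str.len p) 1)
          then (g.1 + 1, PySem.Set.update g.2 (PySem.List.pyRange i (i + PySem.Str.len p) 1))
          else g) (((pos.length : Nat) : Int), used)
      = (((occs.foldl (aStep p) (pos, used)).1.length : Int), (occs.foldl (aStep p) (pos, used)).2)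
  | [], pos, used => by simp
  | i :: occs, pos, used => by
    rw [List.foldl_cons, List.foldl_cons]
    rw [isdisjoint_span used (PySem.List.pyRange i (i + PySem.Str.len p) 1)]
    by_cases hov : (PySem.List.pyRange i (i + PySem.Str.len p) 1).any (fun q => PySem.Set.contains used q) = true
    · have hstep : aStep p (pos, used) i = (pos, used) := by
        simp only [aStep]
        rw [if_pos hov]
      rw [hov, hstep]
      simp only [Bool.not_true, if_neg (by simp : ¬ (false = true))]
      exact foldl_ab p occs pos used
    · have hov' : ((PySem.List.pyRange i (i + PySem.Str.len p) 1).any (fun q => PySem.Set.contains used q)) = false := by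
        simpa using hov
      have hstep : aStep p (pos, used) i
          = (pos ++ [i], (PySem.List.pyRange i (i + PySem.Str.len p) 1).foldl PySem.Set.add used) := by
        simp only [aStep]
        rw [if_neg (by rw [hov']; simp)]
      rw [hov', hstep]
      simp only [Bool.not_false, if_pos rfl]
      have hlen : ((pos.length : Nat) : Int) + 1 = (((pos ++ [i]).length : Nat) : Int) := by
        simp
      rw [hlen]
      exact foldl_ab p occs (pos ++ [i]) _

-- A's outer selection fold is the canonical fold
theorem outer_fold_eq (t : String) :
    ∀ (S : List (String × Int)) (d : PySem.Dict String Int) (u : PySem.Set Int),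
      (∀ pc ∈ S, 1 ≤ PySem.Str.len pc.1 ∧ PySem.Str.len pc.1 ≤ PySem.Str.len t) →
      S.foldl (fun (st : PySem.Dict String Int × PySem.Set Int) pc =>
          let r := aFindLoop t pc.1 (PySem.Str.find t pc.1) ([], st.2) ((PySem.Str.len t).toNat + 2)
          if 1 < (PySem.List.len r.1) then (st.1.insert pc.1 (PySem.List.len r.1), r.2) else (st.1, r.2)) (d, u)
      = S.foldl (cstep t) (d, u)
  | [], d, u, hS => rfl
  | pc :: S, d, u, hS => by
    rw [List.foldl_cons, List.foldl_cons]
    dsimp only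
    obtain ⟨hL1, hLn⟩ := hS pc List.mem_cons_self
    have hp : pc.1.toList ≠ [] := by
      rw [PySem.Str.len_eq] at hL1
      exact List.ne_nil_of_length_pos (by omega)
    have hfind : PySem.Str.find t pc.1 = PySem.Str.findFrom t pc.1 (((0:Nat) : Int)) none := by
      rw [PySem.Str.findFrom_eq, PySem.Str.find_eq]
      simp
    have hr := scan_eq t pc.1 hp ((PySem.Str.len t).toNat + 2) 0 ([], u) (by omega)
      (by rw [PySem.Str.len_eq]; omega)
    have hcstep : cstep t (d, u) pc
        = (let r := ((occInt t pc.1).foldl (aStep pc.1) ([], u));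
           if 1 < ((r.1.length : Nat) : Int) then (d.insert pc.1 ((r.1.length : Nat) : Int), r.2) else (d, r.2)) := by
      simp only [cstep]
      have hfab := foldl_ab pc.1 (occInt t pc.1) [] u
      simp only [List.length_nil, Nat.cast_zero] at hfab
      rw [hfab]
    rw [hfind, hr, ← occInt_eq t pc.1 hL1 hLn, hcstep]
    simp only [PySem.List.len_eq]
    exact outer_fold_eq t S _ _ (fun q hq => hS q (List.mem_cons_of_mem _ hq))

-- ---- greedy scan over the occurrence list IS str.count ----
theorem nov_eq_of_le (L : Nat) (ps : List Nat) (nxt nxt' : Nat)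
    (h : ∀ i ∈ ps, nxt ≤ i) (h' : ∀ i ∈ ps, nxt' ≤ i) : nov L ps nxt = nov L ps nxt' := by
  cases ps with
  | nil => rfl
  | cons i ps =>
    rw [nov, nov, if_pos (h i List.mem_cons_self), if_pos (h' i List.mem_cons_self)]

theorem nov_skip (tl pl : List Char) :
    ∀ (fuel a nxt : Nat), a ≤ nxt → nxt - a ≤ fuel →
      nov pl.length (occsFrom tl pl a) nxt = nov pl.length (occsFrom tl pl nxt) nxt
  | fuel, a, nxt, hle, hfuel => by
    rcases Nat.eq_or_lt_of_le hle with rfl | hlt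
    · rfl
    · have hfuel1 : 1 ≤ fuel := by omega
      rw [occsFrom]
      by_cases h : tl.length + 1 ≤ a
      · rw [if_pos h, occsFrom, if_pos (by omega)]
      · rw [if_neg h]
        by_cases hpref : pl <+: tl.drop a
        · rw [if_pos hpref, List.singleton_append, nov, if_neg (by omega)]
          exact nov_skip tl pl (fuel - 1) (a+1) nxt hlt (by omega)
        · rw [if_neg hpref, List.nil_append]
          exact nov_skip tl pl (fuel - 1) (a+1) nxt hlt (by omega)
  termination_by fuel => fuel
  decreasing_by all_goals omega

theorem go_eq_nov (tl pl : List Char) (hpl : pl ≠ []) :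
    ∀ (fuel j : Nat) (acc : Nat), tl.length - j ≤ fuel →
      PySem.Chars.count.go pl fuel (tl.drop j) acc = acc + nov pl.length (occsFrom tl pl j) j
  | 0, j, acc, hfuel => by
    have hj : tl.length ≤ j := by omega
    rw [List.drop_eq_nil_of_le hj, occsFrom_nil_of_ge tl pl j hj hpl]
    simp [PySem.Chars.count.go, nov]
  | fuel+1, j, acc, hfuel => by
    have hL1 : 1 ≤ pl.length := List.length_pos_iff.2 hpl
    cases hdj : tl.drop j with
    | nil =>
      have hj : tl.length ≤ j := by
        by_contra h
        exact (List.ne_nil_of_length_pos (by rw [List.length_drop]; omega)) hdj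
      rw [occsFrom_nil_of_ge tl pl j hj hpl]
      simp [PySem.Chars.count.go, nov]
    | cons c rest =>
      have hj : j < tl.length := by
        by_contra h
        rw [List.drop_eq_nil_of_le (by omega)] at hdj
        exact absurd hdj (by simp)
      have hgo : PySem.Chars.count.go pl (fuel+1) (c :: rest) acc
          = if pl.isPrefixOf (c :: rest)
            then PySem.Chars.count.go pl fuel (List.drop pl.length (c :: rest)) (acc + 1)
            else PySem.Chars.count.go pl fuel rest acc := by
        simp [PySem.Chars.count.go]
      rw [hgo]
      have hrest : rest = tl.drop (j + 1) := by
        have h : (tl.drop j).tail = tl.drop (j + 1) := by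
          rw [← List.drop_drop]
          simp
        rw [hdj] at h
        simpa using h
      by_cases hpref : pl <+: tl.drop j
      · have hb : pl.isPrefixOf (c :: rest) = true := by
          rw [← hdj]
          exact List.isPrefixOf_iff_prefix.2 hpref
        rw [if_pos hb, ← hdj, List.drop_drop]
        rw [go_eq_nov tl pl hpl fuel (j + pl.length) (acc + 1) (by omega)]
        have hocc : occsFrom tl pl j = j :: occsFrom tl pl (j + 1) := by
          rw [occsFrom, if_neg (by omega), if_pos hpref]
          rfl
        rw [hocc, nov, if_pos le_rfl]
        rw [nov_skip tl pl pl.length (j+1) (j + pl.length) (by omega) (by omega)]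
        omega
      · have hb : pl.isPrefixOf (c :: rest) = false := by
          rw [← hdj, ← Bool.not_eq_true]
          intro h
          exact hpref (List.isPrefixOf_iff_prefix.1 h)
        rw [if_neg (by simp [hb]), hrest]
        rw [go_eq_nov tl pl hpl fuel (j + 1) acc (by omega)]
        have hocc : occsFrom tl pl j = occsFrom tl pl (j + 1) := by
          rw [occsFrom, if_neg (by omega), if_neg hpref, List.nil_append]
        rw [hocc]
        rw [nov_eq_of_le pl.length (occsFrom tl pl (j+1)) j (j+1)
          (fun i hi => by have := mem_occsFrom_ge tl pl (j+1) i hi; omega)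
          (fun i hi => mem_occsFrom_ge tl pl (j+1) i hi)]

theorem count_eq_nov (t p : String) (hp : p.toList ≠ []) :
    PySem.Str.count t p = nov p.toList.length (occsFrom t.toList p.toList 0) 0 := by
  rw [PySem.Str.count_eq, PySem.Chars.count]
  rw [if_neg (by simpa using hp)]
  have h := go_eq_nov t.toList p.toList hp t.toList.length 0 0 (by omega)
  rw [List.drop_zero] at h
  rw [h]
  omega

def novEndP (L : Nat) (ps : List Nat) (nxt : Nat) : Nat := novEnd L ps nxt

theorem count_fold_cast (L : Nat) :
    ∀ (ps : List Nat) (c nxt : Nat),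
      (ps.map (fun j : Nat => (j : Int))).foldl
        (fun (g : Int × Int) i => if g.2 ≤ i then (g.1 + 1, i + (L : Int)) else g)
        ((c : Int), (nxt : Int))
      = (((c + nov L ps nxt : Nat) : Int), ((novEnd L ps nxt : Nat) : Int))
  | [], c, nxt => by simp [nov, novEnd]
  | i :: ps, c, nxt => by
    rw [List.map_cons, List.foldl_cons, nov, novEnd]
    dsimp only
    by_cases h : nxt ≤ i
    · rw [if_pos (show ((nxt : Nat) : Int) ≤ ((i : Nat) : Int) by exact_mod_cast h),
        if_pos h, if_pos h]
      have h1 : ((c : Int) + 1, (i : Int) + (L : Int)) = (((c+1 : Nat) : Int), ((i + L : Nat) : Int)) := by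
        push_cast; ring_nf
      rw [h1, count_fold_cast L ps (c+1) (i+L)]
      have h2 : c + 1 + nov L ps (i + L) = c + (nov L ps (i + L) + 1) := by omega
      rw [h2]
    · rw [if_neg (show ¬ ((nxt : Nat) : Int) ≤ ((i : Nat) : Int) by exact_mod_cast h),
        if_neg h, if_neg h]
      exact count_fold_cast L ps c nxt

theorem count_fold_eq_cnt (t p : String) (hp1 : 1 ≤ PySem.Str.len p)
    (hp2 : PySem.Str.len p ≤ PySem.Str.len t) :
    ((occInt t p).foldl
      (fun (g : Int × Int) i => if g.2 ≤ i then (g.1 + 1, i + PySem.Str.len p) else g)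
      (0, 0)).1 = cntI t p := by
  have hp : p.toList ≠ [] := by
    rw [PySem.Str.len_eq] at hp1
    exact List.ne_nil_of_length_pos (by omega)
  rw [occInt_eq t p hp1 hp2]
  have hL : PySem.Str.len p = ((p.toList.length : Nat) : Int) := by rw [PySem.Str.len_eq]
  rw [hL]
  have h0 : ((0 : Int), (0 : Int)) = (((0:Nat) : Int), ((0:Nat) : Int)) := by norm_num
  rw [h0, count_fold_cast p.toList.length (occsFrom t.toList p.toList 0) 0 0]
  rw [cntI, count_eq_nov t p hp]
  simp

-- ---- insertion-sort block decomposition ----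
theorem insertBy_append_of_before {α : Type} (before : α → α → Bool) (x : α) :
    ∀ (l1 l2 : List α), (∀ b ∈ l2, before x b = true) →
      PySem.List.insertBy before x (l1 ++ l2) = PySem.List.insertBy before x l1 ++ l2
  | [], l2, h => by
    cases l2 with
    | nil => simp [PySem.List.insertBy]
    | cons b l2 =>
      rw [List.nil_append]
      simp only [PySem.List.insertBy]
      rw [if_pos (h b List.mem_cons_self)]
      rfl
  | c :: l1, l2, h => by
    rw [List.cons_append]
    simp only [PySem.List.insertBy]
    by_cases hc : before x c = true
    · rw [if_pos hc, if_pos hc, List.cons_append, List.cons_append]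
    · rw [if_neg hc, if_neg hc, List.cons_append,
        insertBy_append_of_before before x l1 l2 h]

theorem foldl_insertBy_append {α : Type} (before : α → α → Bool) :
    ∀ (g front acc : List α), (∀ x ∈ g, ∀ b ∈ acc, before x b = true) →
      g.foldl (fun a x => PySem.List.insertBy before x a) (front ++ acc)
      = g.foldl (fun a x => PySem.List.insertBy before x a) front ++ acc
  | [], front, acc, h => rfl
  | x :: g, front, acc, h => by
    rw [List.foldl_cons, List.foldl_cons,
      insertBy_append_of_before before x front acc (h x List.mem_cons_self)]
    exact foldl_insertBy_append before g _ acc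
      (fun y hy b hb => h y (List.mem_cons_of_mem _ hy) b hb)

theorem insertBy_congr {α : Type} (before before' : α → α → Bool) (x : α) :
    ∀ (ys : List α), (∀ b ∈ ys, before x b = before' x b) →
      PySem.List.insertBy before x ys = PySem.List.insertBy before' x ys
  | [], h => rfl
  | b :: ys, h => by
    simp only [PySem.List.insertBy]
    rw [h b List.mem_cons_self]
    by_cases hb : before' x b = true
    · rw [if_pos hb, if_pos hb]
    · rw [if_neg hb, if_neg hb,
        insertBy_congr before before' x ys (fun c hc => h c (List.mem_cons_of_mem _ hc))]

theorem foldl_insertBy_congr {α : Type} (before before' : α → α → Bool) :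
    ∀ (g acc : List α), (∀ x ∈ g, ∀ b, (b ∈ acc ∨ b ∈ g) → before x b = before' x b) →
      g.foldl (fun a x => PySem.List.insertBy before x a) acc
      = g.foldl (fun a x => PySem.List.insertBy before' x a) acc
  | [], acc, h => rfl
  | x :: g, acc, h => by
    rw [List.foldl_cons, List.foldl_cons,
      insertBy_congr before before' x acc
        (fun b hb => h x List.mem_cons_self b (Or.inl hb))]
    apply foldl_insertBy_congr before before' g
    intro y hy b hb
    rcases hb with hb | hb
    · rcases (PySem.List.insertBy_mem_iff before' x b acc).1 hb with rfl | hb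
      · exact h y (List.mem_cons_of_mem _ hy) b (Or.inr List.mem_cons_self)
      · exact h y (List.mem_cons_of_mem _ hy) b (Or.inl hb)
    · exact h y (List.mem_cons_of_mem _ hy) b (Or.inr (List.mem_cons_of_mem _ hb))

theorem before2_of_lt (x b : String × Int) (h : PySem.Str.len b.1 < PySem.Str.len x.1) :
    before2 x b = true := by
  rw [before2]
  have : decide (-(PySem.Str.len x.1) < -(PySem.Str.len b.1)) = true := by
    rw [decide_eq_true_eq]; omega
  rw [this, Bool.true_or]

theorem before2_of_eq (x b : String × Int) (h : PySem.Str.len x.1 = PySem.Str.len b.1) :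
    before2 x b = decide (-x.2 < -b.2) := by
  rw [before2]
  have h1 : decide (-(PySem.Str.len x.1) < -(PySem.Str.len b.1)) = false := by
    rw [decide_eq_false_iff_not]; omega
  have h2 : decide (-(PySem.Str.len b.1) < -(PySem.Str.len x.1)) = false := by
    rw [decide_eq_false_iff_not]; omega
  rw [h1, h2]
  simp

theorem len_mem_blockOf (t : String) (L : Int) (hL : 0 ≤ L) :
    ∀ x ∈ blockOf t L, PySem.Str.len x.1 = L := by
  intro x hx
  exact len_mem_gkeys t L hL x.1 (mem_appNew t (gkeys t L) [] x hx).1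

theorem block_sort (t : String) (L : Int) (hL : 0 ≤ L) :
    (blockOf t L).foldl (fun a x => PySem.List.insertBy before2 x a) []
      = sblock t L := by
  rw [sblock, PySem.List.sorted_eq_foldl_insertBy]
  apply foldl_insertBy_congr
  intro x hx b hb
  have hxl := len_mem_blockOf t L hL x hx
  have hbl : PySem.Str.len b.1 = L := by
    rcases hb with hb | hb
    · exact absurd hb (List.not_mem_nil)
    · exact len_mem_blockOf t L hL b hb
  exact before2_of_eq x b (by omega)

theorem blocks_fold (t : String) (hi : Int) :
    ∀ (fuel : Nat) (lo : Int) (acc : List (String × Int)), 1 ≤ lo → (hi - lo).toNat ≤ fuel →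
      (∀ x ∈ ((PySem.List.pyRange lo hi 1).map (blockOf t)).flatten, ∀ b ∈ acc, before2 x b = true) →
      (((PySem.List.pyRange lo hi 1).map (blockOf t)).flatten).foldl
        (fun a x => PySem.List.insertBy before2 x a) acc
      = (((PySem.List.pyRange lo hi 1).reverse.map (sblock t)).flatten) ++ acc
  | fuel, lo, acc, hlo, hfuel, hacc => by
    by_cases hr : hi ≤ lo
    · rw [PySem.List.pyRange_one_eq_nil hr]
      simp
    · push_neg at hr
      rw [PySem.List.pyRange_one_cons hr] at *
      rw [List.map_cons, List.flatten_cons] at *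
      rw [List.foldl_append]
      have hblock : (blockOf t lo).foldl (fun a x => PySem.List.insertBy before2 x a) acc
          = sblock t lo ++ acc := by
        have h0 := foldl_insertBy_append before2 (blockOf t lo) [] acc
          (fun x hx b hb => hacc x (List.mem_append_left _ hx) b hb)
        rw [List.nil_append] at h0
        rw [h0, block_sort t lo (by omega)]
      rw [hblock]
      have hrec := blocks_fold t hi (fuel - 1) (lo + 1) (sblock t lo ++ acc) (by omega)
        (by omega) ?_
      · rw [hrec, List.reverse_cons, List.map_append, List.flatten_append]
        simp
      · intro x hx b hb
        rcases List.mem_flatten.1 hx with ⟨blk, hblk, hxblk⟩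
        rcases List.mem_map.1 hblk with ⟨L', hL', rfl⟩
        rw [PySem.List.mem_pyRange_one] at hL'
        have hxlen : PySem.Str.len x.1 = L' := len_mem_blockOf t L' (by omega) x hxblk
        rcases List.mem_append.1 hb with hb | hb
        · have hblen : PySem.Str.len b.1 = lo := by
            rw [sblock, PySem.List.mem_sorted] at hb
            exact len_mem_blockOf t lo (by omega) b hb
          exact before2_of_lt x b (by omega)
        · refine hacc x ?_ b hb
          apply List.mem_append_right
          exact List.mem_flatten.2 ⟨blockOf t L', List.mem_map.2
            ⟨L', PySem.List.mem_pyRange_one.2 ⟨by omega, hL'.2⟩, rfl⟩, hxblk⟩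
  termination_by fuel => fuel
  decreasing_by all_goals omega

theorem sorted2_blocks (t : String) (lo hi : Int) (hlo : 1 ≤ lo) :
    PySem.List.sorted2 (((PySem.List.pyRange lo hi 1).map (blockOf t)).flatten)
        (fun x => -(PySem.Str.len x.1)) (fun x => -x.2)
      = ((PySem.List.pyRange lo hi 1).reverse.map (sblock t)).flatten := by
  have h : PySem.List.sorted2 (((PySem.List.pyRange lo hi 1).map (blockOf t)).flatten)
        (fun x => -(PySem.Str.len x.1)) (fun x => -x.2)
      = (((PySem.List.pyRange lo hi 1).map (blockOf t)).flatten).foldl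
          (fun a x => PySem.List.insertBy before2 x a) [] := rfl
  rw [h, blocks_fold t hi (hi - lo).toNat lo [] hlo le_rfl (by intro x _ b hb; cases hb)]
  simp

-- ---- the patterns dict items split into length blocks ----
theorem patA_eq_wkeys_fold (t : String) (lo hi : Int) (d : PySem.Dict String Int) :
    (PySem.List.pyRange lo hi 1).foldl (fun pats len =>
      (PySem.List.pyRange 0 (PySem.Str.len t - len + 1) 1).foldl (fun pats i =>
        let pattern := PySem.Str.slice t (some i) (some (i + len))
        let count : Int := (PySem.Str.count t pattern : Int)
        if 1 < count then pats.insert pattern count else pats) pats) d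
    = (wkeys t lo hi).foldl (gateStep t) d := by
  rw [wkeys, List.foldl_flatMap]
  apply PySem.List.foldl_congr_mem
  intro acc L _
  rw [gkeys, List.foldl_map]
  rfl

theorem appNew_blocks (t : String) (hi : Int) :
    ∀ (fuel : Nat) (lo : Int), 1 ≤ lo → (hi - lo).toNat ≤ fuel →
      appNew t ((PySem.List.pyRange lo hi 1).flatMap (gkeys t)) []
      = ((PySem.List.pyRange lo hi 1).map (blockOf t)).flatten
  | fuel, lo, hlo, hfuel => by
    by_cases hr : hi ≤ lo
    · rw [PySem.List.pyRange_one_eq_nil hr]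
      simp [appNew]
    · push_neg at hr
      rw [PySem.List.pyRange_one_cons hr, List.flatMap_cons, List.map_cons, List.flatten_cons]
      have hrest : ∀ p ∈ (PySem.List.pyRange (lo+1) hi 1).flatMap (gkeys t),
          PySem.Str.len p ≠ lo := by
        intro p hp
        rcases List.mem_flatMap.1 hp with ⟨L', hL', hpg⟩
        rw [PySem.List.mem_pyRange_one] at hL'
        rw [len_mem_gkeys t L' (by omega) p hpg]
        omega
      rw [appNew_append_block t (gkeys t lo) _ []
        (by intro p _; simp)
        (by
          intro p hp
          rw [← Bool.not_eq_true, List.contains_eq_mem, decide_eq_true_eq]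
          intro hmem
          exact hrest p hp (len_mem_gkeys t lo (by omega) p hmem))]
      rw [show appNew t (gkeys t lo) [] = blockOf t lo from rfl]
      rw [appNew_blocks t hi (fuel - 1) (lo + 1) (by omega) (by omega)]
  termination_by fuel => fuel
  decreasing_by all_goals omega

-- ---- B's per-length pieces ----
theorem dedupFrom_sublist : ∀ (l ks : List String), ∀ x ∈ dedupFrom ks l, x ∈ l
  | [], ks, x, h => by simp [dedupFrom] at h
  | y :: l, ks, x, h => by
    rw [dedupFrom] at h
    by_cases hk : ks.contains y
    · rw [if_pos hk] at h
      exact List.mem_cons_of_mem _ (dedupFrom_sublist l ks x h)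
    · rw [if_neg hk] at h
      rcases List.mem_cons.1 h with rfl | h
      · exact List.mem_cons_self
      · exact List.mem_cons_of_mem _ (dedupFrom_sublist l (ks ++ [y]) x h)

theorem ofList_eq_dedupFrom (l : List String) : PySem.Set.ofList l = dedupFrom [] l := by
  have h := update_eq_dedupFrom l []
  rw [PySem.Set.update_nil_left] at h
  simpa using h

theorem appNew_nodup_eq (t : String) :
    ∀ (l seen : List String), l.Nodup → (∀ p ∈ l, seen.contains p = false) →
      appNew t l seen
      = (l.filter (fun p => decide (1 < cntI t p))).map (fun p => (p, cntI t p))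
  | [], seen, _, _ => by simp [appNew]
  | p :: l, seen, hnd, hs => by
    rw [appNew, List.filter_cons]
    have hsp : seen.contains p = false := hs p List.mem_cons_self
    rcases List.nodup_cons.1 hnd with ⟨hp, hnd'⟩
    by_cases hc : 1 < cntI t p
    · rw [if_pos ⟨hc, hsp⟩, if_pos (by simpa using hc), List.map_cons]
      congr 1
      apply appNew_nodup_eq t l (seen ++ [p]) hnd'
      intro q hq
      rw [List.contains_eq_mem, decide_eq_false_iff_not]
      rw [List.mem_append, List.mem_singleton]
      rintro (h | rfl)
      · have := hs q (List.mem_cons_of_mem _ hq)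
        rw [List.contains_eq_mem, decide_eq_false_iff_not] at this
        exact this h
      · exact hp hq
    · rw [if_neg (by intro h; exact hc h.1), if_neg (by simpa using hc)]
      exact appNew_nodup_eq t l seen hnd' (fun q hq => hs q (List.mem_cons_of_mem _ hq))

-- the per-length occurrence dict of B
theorem occ_dict_getD (t : String) (L : Int) (p : String) (hlen : PySem.Str.len p = L) :
    ((PySem.List.pyRange 0 (PySem.Str.len t - L + 1) 1).foldl (fun occ i =>
        occ.modify (PySem.Str.slice t (some i) (some (i + L))) [] (fun ps => ps ++ [i]))
        PySem.Dict.empty).getD p []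
    = occInt t p := by
  have hmap : (PySem.List.pyRange 0 (PySem.Str.len t - L + 1) 1).foldl (fun occ i =>
        occ.modify (PySem.Str.slice t (some i) (some (i + L))) [] (fun ps => ps ++ [i]))
        PySem.Dict.empty
      = (gpairs t L).foldl (fun d pr => d.modify pr.1 [] (fun ps => ps ++ [pr.2]))
        PySem.Dict.empty := by
    rw [gpairs, List.foldl_map]
  rw [hmap, PySem.Dict.getD_foldl_modify_append]
  rw [show (PySem.Dict.empty : PySem.Dict String (List Int)).getD p [] = [] from rfl,
    List.nil_append]
  exact gpairs_filter_key t L p hlen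

theorem occ_dict_keys (t : String) (L : Int) :
    ((PySem.List.pyRange 0 (PySem.Str.len t - L + 1) 1).foldl (fun occ i =>
        occ.modify (PySem.Str.slice t (some i) (some (i + L))) [] (fun ps => ps ++ [i]))
        PySem.Dict.empty).keys
    = PySem.Set.ofList (gkeys t L) := by
  have h := PySem.Dict.keys_foldl_modify_key (PySem.List.pyRange 0 (PySem.Str.len t - L + 1) 1)
    (fun i => PySem.Str.slice t (some i) (some (i + L))) []
    (fun _ i => fun ps => ps ++ [i]) PySem.Dict.empty
  rw [h]
  rw [show (PySem.Dict.empty : PySem.Dict String (List Int)).keys = [] from rfl,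
    PySem.Set.update_nil_left]
  rfl

-- B's bucket is A's block
theorem bucket_eq_block (t : String) (L : Int) (hL : 1 ≤ L) (hLt : L ≤ PySem.Str.len t) :
    (((PySem.List.pyRange 0 (PySem.Str.len t - L + 1) 1).foldl (fun occ i =>
        occ.modify (PySem.Str.slice t (some i) (some (i + L))) [] (fun ps => ps ++ [i]))
        PySem.Dict.empty).items).foldl (fun b pr =>
          let r := pr.2.foldl (fun (g : Int × Int) i =>
              if g.2 ≤ i then (g.1 + 1, i + L) else g) (0, 0)
          if 1 < r.1 then b ++ [(pr.1, r.1)] else b) []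
    = blockOf t L := by
  set oL := (PySem.List.pyRange 0 (PySem.Str.len t - L + 1) 1).foldl (fun occ i =>
      occ.modify (PySem.Str.slice t (some i) (some (i + L))) [] (fun ps => ps ++ [i]))
      PySem.Dict.empty with hoL
  have hnd : oL.keys.Nodup := by
    rw [hoL, occ_dict_keys]
    exact PySem.Set.nodup_ofList (gkeys t L)
  have hitems : oL.items = oL.keys.map (fun k => (k, oL.getD k [])) :=
    PySem.Dict.items_eq_map_keys oL hnd []
  have hkeys : oL.keys = dedupFrom [] (gkeys t L) := by
    rw [hoL, occ_dict_keys, ofList_eq_dedupFrom]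
  have hndk : (dedupFrom [] (gkeys t L)).Nodup := by
    rw [← hkeys]; exact hnd
  have hfold : (oL.items).foldl (fun b pr =>
        let r := pr.2.foldl (fun (g : Int × Int) i =>
            if g.2 ≤ i then (g.1 + 1, i + L) else g) (0, 0)
        if 1 < r.1 then b ++ [(pr.1, r.1)] else b) []
      = (dedupFrom [] (gkeys t L)).foldl (fun b k =>
          let r := (occInt t k).foldl (fun (g : Int × Int) i =>
              if g.2 ≤ i then (g.1 + 1, i + L) else g) (0, 0)
          if 1 < r.1 then b ++ [(k, r.1)] else b) [] := by
    rw [hitems, hkeys, List.foldl_map]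
    apply PySem.List.foldl_congr_mem
    intro acc k hk
    have hlen : PySem.Str.len k = L :=
      len_mem_gkeys t L (by omega) k (dedupFrom_sublist (gkeys t L) [] k hk)
    have hg : oL.getD k [] = occInt t k := by
      rw [hoL]; exact occ_dict_getD t L k hlen
    dsimp only
    rw [hg]
  rw [hfold]
  have hcnt : ∀ k ∈ dedupFrom [] (gkeys t L),
      ((occInt t k).foldl (fun (g : Int × Int) i =>
          if g.2 ≤ i then (g.1 + 1, i + L) else g) (0, 0)).1 = cntI t k := by
    intro k hk
    have hlen : PySem.Str.len k = L :=
      len_mem_gkeys t L (by omega) k (dedupFrom_sublist (gkeys t L) [] k hk)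
    rw [← hlen]
    exact count_fold_eq_cnt t k (by omega) (by omega)
  have hstep : (dedupFrom [] (gkeys t L)).foldl (fun b k =>
        let r := (occInt t k).foldl (fun (g : Int × Int) i =>
            if g.2 ≤ i then (g.1 + 1, i + L) else g) (0, 0)
        if 1 < r.1 then b ++ [(k, r.1)] else b) []
      = (dedupFrom [] (gkeys t L)).foldl (fun b k =>
          if 1 < cntI t k then b ++ [(k, cntI t k)] else b) [] := by
    apply PySem.List.foldl_congr_mem
    intro acc k hk
    simp only
    rw [hcnt k hk]
  rw [hstep, PySem.List.foldl_append_ite (fun k => 1 < cntI t k) (fun k => (k, cntI t k))]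
  rw [List.nil_append, blockOf]
  rw [appNew_dedupFrom t (gkeys t L) [] [] (by intro x hx; simp at hx)]
  rw [appNew_nodup_eq t (dedupFrom [] (gkeys t L)) [] hndk (by intro p _; simp)]

-- ---- empty text ----
theorem count_empty_le_one (x : String) : cntI "" x ≤ 1 := by
  rw [cntI, PySem.Str.count_eq]
  show (PySem.Chars.count [] x.toList : Int) ≤ 1
  unfold PySem.Chars.count
  by_cases h : x.toList.isEmpty
  · simp [h]
  · rw [if_neg h]
    cases hx : x.toList with
    | nil => simp [hx] at h
    | cons c cs => simp [PySem.Chars.count.go]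

-- ---- pyRange with step -1 is the reverse of the ascending range ----
theorem pyRange_neg_rev (hi : Int) :
    ∀ (fuel : Nat) (lo : Int), (hi - lo).toNat ≤ fuel →
      PySem.List.pyRange (hi - 1) (lo - 1) (-1) = (PySem.List.pyRange lo hi 1).reverse
  | fuel, lo, hfuel => by
    by_cases hr : hi ≤ lo
    · rw [PySem.List.pyRange_one_eq_nil hr, PySem.List.pyRange_neg_one_eq_nil (by omega)]
      rfl
    · push_neg at hr
      rw [PySem.List.pyRange_neg_one_cons (by omega)]
      rw [PySem.List.pyRange_one_append lo (hi - 1) hi (by omega) (by omega)]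
      rw [List.reverse_append]
      have hsing : PySem.List.pyRange (hi - 1) hi 1 = [hi - 1] := by
        rw [PySem.List.pyRange_one_cons (by omega), PySem.List.pyRange_one_eq_nil (by omega)]
      rw [hsing, show ([hi - 1] : List Int).reverse = [hi - 1] from rfl]
      rw [show hi - 1 - 1 = (hi - 1) - 1 from rfl]
      have := pyRange_neg_rev (hi - 1) (fuel - 1) lo (by omega)
      rw [this]
      rfl
  termination_by fuel => fuel
  decreasing_by all_goals omega

-- ---- main positive case ----
theorem main_pos (text : String) (min_length : Int) (hmin : 1 ≤ min_length) :
    find_repeated_patterns text min_length = find_repeated_patterns_alt text min_length := by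
  unfold find_repeated_patterns find_repeated_patterns_alt
  dsimp only
  rw [Int.max_eq_left hmin]
  set t := PySem.Str.lower text with ht
  set n : Int := PySem.Str.len t with hn
  set lo := min_length with hlo
  set hi := PySem.Int.floordiv n 2 + 1 with hhi
  have hn0 : (0:Int) ≤ n := by rw [hn, PySem.Str.len_eq]; positivity
  have hdiv : PySem.Int.floordiv n 2 ≤ n := by
    rw [PySem.Int.floordiv_eq_ediv_of_pos (by norm_num)]
    exact Int.ediv_le_self 2 hn0
  -- A's patterns dict items are the length blocks
  have hempty_items : ∀ pr ∈ (PySem.Dict.empty : PySem.Dict String Int).items, pr.2 = cntI t pr.1 := by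
    intro pr h
    simp [PySem.Dict.empty] at h
  have hpat : ((PySem.List.pyRange lo hi 1).foldl (fun pats len =>
      (PySem.List.pyRange 0 (n - len + 1) 1).foldl (fun pats i =>
        let pattern := PySem.Str.slice t (some i) (some (i + len))
        let count : Int := (PySem.Str.count t pattern : Int)
        if 1 < count then pats.insert pattern count else pats) pats)
      PySem.Dict.empty).items
      = ((PySem.List.pyRange lo hi 1).map (blockOf t)).flatten := by
    rw [hn, patA_eq_wkeys_fold t lo hi PySem.Dict.empty,
      foldl_gate_items t (wkeys t lo hi) PySem.Dict.empty hempty_items]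
    rw [show (PySem.Dict.empty : PySem.Dict String Int).items = [] from rfl,
      show (PySem.Dict.empty : PySem.Dict String Int).keys = [] from rfl, List.nil_append]
    rw [wkeys, appNew_blocks t hi (hi - lo).toNat lo hmin le_rfl]
  rw [hpat, sorted2_blocks t lo hi hmin]
  -- A's selection over the flattened blocks is the canonical fold
  have hmemS : ∀ pc ∈ (((PySem.List.pyRange lo hi 1).reverse.map (sblock t)).flatten),
      1 ≤ PySem.Str.len pc.1 ∧ PySem.Str.len pc.1 ≤ PySem.Str.len t := by
    intro pc hpc
    rcases List.mem_flatten.1 hpc with ⟨blk, hblk, hmem⟩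
    rcases List.mem_map.1 hblk with ⟨L, hL, rfl⟩
    rw [List.mem_reverse, PySem.List.mem_pyRange_one] at hL
    rw [sblock, PySem.List.mem_sorted] at hmem
    have := len_mem_blockOf t L (by omega) pc hmem
    constructor
    · omega
    · rw [this, ← hn]; omega
  rw [outer_fold_eq t _ PySem.Dict.empty PySem.Set.empty hmemS]
  -- B's descending loop is the same canonical fold
  have hrev : PySem.List.pyRange (PySem.Int.floordiv n 2) (lo - 1) (-1)
      = (PySem.List.pyRange lo hi 1).reverse := by
    rw [show PySem.Int.floordiv n 2 = hi - 1 from by omega]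
    exact pyRange_neg_rev hi (hi - lo).toNat lo le_rfl
  rw [hrev]
  rw [List.foldl_flatten]
  rw [List.foldl_map]
  apply congrArg (fun r : PySem.Dict String Int × PySem.Set Int => r.1.items)
  apply PySem.List.foldl_congr_mem
  intro st L hL
  rw [List.mem_reverse, PySem.List.mem_pyRange_one] at hL
  dsimp only
  rw [hn, bucket_eq_block t L (by omega) (by omega)]
  rw [show PySem.List.sorted (blockOf t L) (fun x : String × Int => -x.2) = sblock t L from rfl]
  apply PySem.List.foldl_congr_mem
  intro st' pc hpc
  rw [sblock, PySem.List.mem_sorted] at hpc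
  have hlen : PySem.Str.len pc.1 = L := len_mem_blockOf t L (by omega) pc hpc
  simp only [cstep]
  rw [occ_dict_getD t L pc.1 hlen, hlen]

-- ---- empty text, any min_length ----
theorem main_empty (min_length : Int) :
    find_repeated_patterns "" min_length = find_repeated_patterns_alt "" min_length := by
  unfold find_repeated_patterns find_repeated_patterns_alt
  dsimp only
  rw [show PySem.Str.lower "" = "" from rfl]
  rw [show PySem.Str.len "" = (0:Int) from rfl]
  rw [show PySem.Int.floordiv 0 2 + 1 = 1 from rfl]
  rw [show PySem.Int.floordiv 0 2 = (0:Int) from rfl]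
  rw [PySem.List.pyRange_neg_one_eq_nil (by omega : (0:Int) ≤ max min_length 1 - 1), List.foldl_nil]
  have hA : (PySem.List.pyRange min_length 1 1).foldl (fun pats len =>
      (PySem.List.pyRange 0 (0 - len + 1) 1).foldl (fun pats i =>
        if 1 < ((PySem.Str.count "" (PySem.Str.slice "" (some i) (some (i + len))) : Nat) : Int)
        then pats.insert (PySem.Str.slice "" (some i) (some (i + len)))
          ((PySem.Str.count "" (PySem.Str.slice "" (some i) (some (i + len))) : Nat) : Int)
        else pats) pats) PySem.Dict.empty = PySem.Dict.empty := by
    refine List.foldl_fixed' ?_ _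
    intro len
    refine List.foldl_fixed' ?_ _
    intro i
    rw [if_neg ?_]
    have h := count_empty_le_one (PySem.Str.slice "" (some i) (some (i + len)))
    rw [cntI] at h
    omega
  rw [hA]
  rfl

-- ===== VERDICT (by name: the statement is the Claim_ definition above) =====
theorem find_repeated_patterns_spec : Claim_unchanged_find_repeated_patterns := by
  intro text min_length _ hnd
  by_cases hmin : 1 ≤ min_length
  · exact main_pos text min_length hmin
  · have htext : text = "" := by
      by_contra hne
      exact hnd (by unfold D_find_repeated_patterns; exact ⟨by omega, hne⟩)
    subst htext
    exact main_empty min_length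

theorem find_repeated_patterns_changed : Claim_changed_find_repeated_patterns := by
  unfold Claim_changed_find_repeated_patterns; decide
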